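-- pv_equiv track=rewrite | github.com/diakymenko/coursera_python | Week4/Berlin_clock.py | str_r_hours
-- ===== SOURCE A (Python) =====
-- def str_r_hours(number, color):
--     str = ""
--     for i in range(4):
--         if i < number:
--             str = str + color
--         else:
--             str = str + "O"
--     return str
-- ===== SOURCE B (Python) =====
-- # Closed form: the loop lights exactly clamp(number, 0, 4) of the 4 lamps.
-- def str_r_hours(number, color):
--     k = min(4, max(0, number))
--     return color * k + "O" * (4 - k)
-- ===== Notes on version B (the rewrite author's own statement) =====
-- stated objective: simpler
-- what changed: Replaces the per-lamp loop with a closed form: k = clamp(number, 0, 4) lit lamps, then string repetition color*k + 'O'*(4-k).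
import Mathlib
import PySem

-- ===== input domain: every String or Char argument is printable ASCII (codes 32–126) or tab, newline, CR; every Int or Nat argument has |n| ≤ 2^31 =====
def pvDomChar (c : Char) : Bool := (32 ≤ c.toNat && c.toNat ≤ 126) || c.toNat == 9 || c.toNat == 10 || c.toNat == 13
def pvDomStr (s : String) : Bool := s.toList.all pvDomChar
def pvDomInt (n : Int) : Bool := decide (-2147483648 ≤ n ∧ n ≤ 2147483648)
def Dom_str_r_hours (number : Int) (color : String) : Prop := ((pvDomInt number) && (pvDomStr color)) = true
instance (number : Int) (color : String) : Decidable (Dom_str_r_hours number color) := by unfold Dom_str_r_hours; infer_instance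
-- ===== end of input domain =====

-- B replaces A's per-lamp loop by a closed form (clamp number to [0,4], then string repetition); simpler, same cost.


-- ===== PORT A =====
-- the loop: for i in range(4): str += color if i < number else "O"  (strings as List Char)
def str_r_hours (number : Int) (color : String) : String :=
  String.ofList <|
    (PySem.List.pyRange 0 4 1).foldl
      (fun s i => if i < number then s ++ color.toList else s ++ ['O']) []

-- ===== PORT B =====
def str_r_hours_alt (number : Int) (color : String) : String :=
  let k : Int := min 4 (max 0 number)
  String.ofList (PySem.List.pyRepeat color.toList k ++ PySem.List.pyRepeat ['O'] (4 - k))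

-- ===== PRECONDITION & SPEC =====
def Spec_str_r_hours (number : Int) (color : String) (out : String) : Prop := out = str_r_hours_alt number color
instance (number : Int) (color : String) (out : String) : Decidable (Spec_str_r_hours number color out) := by unfold Spec_str_r_hours; infer_instance

-- ===== CLAIM (what is proved, stated in full; the proofs are below) =====
def Claim_equal_str_r_hours : Prop := ∀ (number : Int) (color : String), Dom_str_r_hours number color → Spec_str_r_hours number color (str_r_hours number color)

-- ===== LEMMAS AND PROOFS =====
theorem pyRange04 : PySem.List.pyRange 0 4 1 = [0, 1, 2, 3] := by decide


-- ===== VERDICT (by name: the statement is the Claim_ definition above) =====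
theorem str_r_hours_spec : Claim_equal_str_r_hours := by
  intro number color _
  unfold Spec_str_r_hours str_r_hours str_r_hours_alt
  rw [pyRange04]
  rcases Classical.em (number ≤ 0) with h0 | h0
  · have : min 4 (max 0 number) = (0 : Int) := by omega
    simp [List.foldl, this, show ¬ (0:Int) < number by omega,
      show ¬ (1:Int) < number by omega, show ¬ (2:Int) < number by omega,
      show ¬ (3:Int) < number by omega, List.replicate, PySem.List.pyRepeat]
  · rcases Classical.em (number ≤ 1) with h1 | h1
    · have : min 4 (max 0 number) = (1 : Int) := by omega
      simp [List.foldl, this, show (0:Int) < number by omega,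
        show ¬ (1:Int) < number by omega, show ¬ (2:Int) < number by omega,
        show ¬ (3:Int) < number by omega, List.replicate, PySem.List.pyRepeat]
    · rcases Classical.em (number ≤ 2) with h2 | h2
      · have : min 4 (max 0 number) = (2 : Int) := by omega
        simp [List.foldl, this, show (0:Int) < number by omega,
          show (1:Int) < number by omega, show ¬ (2:Int) < number by omega,
          show ¬ (3:Int) < number by omega, List.replicate, PySem.List.pyRepeat]
      · rcases Classical.em (number ≤ 3) with h3 | h3
        · have : min 4 (max 0 number) = (3 : Int) := by omega
          simp [List.foldl, this, show (0:Int) < number by omega,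
            show (1:Int) < number by omega, show (2:Int) < number by omega,
            show ¬ (3:Int) < number by omega, List.replicate, PySem.List.pyRepeat]
        · have : min 4 (max 0 number) = (4 : Int) := by omega
          simp [List.foldl, this, show (0:Int) < number by omega,
            show (1:Int) < number by omega, show (2:Int) < number by omega,
            show (3:Int) < number by omega, List.replicate, PySem.List.pyRepeat]
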